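-- pv_equiv track=rewrite | github.com/jinzx10/playground | python/orbgen/upfread.py | _aufbau
-- ===== SOURCE A (Python) =====
-- _aufbau_order = ['1s', '2s', '2p', '3s', '3p', '4s', '3d', '4p', '5s', '4d', '5p', '6s', '4f', '5d', '6p', '7s', '5f', '6d', '7p', '8s']
--
-- _symbol = 'spdfgh'
--
-- def _aufbau(z):
--     '''
--     Returns the label of filled orbitals according to Aufbau principle.
--
--     '''
--     result = []
--     i = 0
--     while z > 0:
--         result.append(_aufbau_order[i])
--         z -= (_symbol.find(_aufbau_order[i][-1]) * 2 + 1) * 2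
--         i += 1
--
--     return result, -z
-- ===== SOURCE B (Python) =====
-- _aufbau_order = ['1s', '2s', '2p', '3s', '3p', '4s', '3d', '4p', '5s', '4d', '5p', '6s', '4f', '5d', '6p', '7s', '5f', '6d', '7p', '8s']
--
-- _symbol = 'spdfgh'
--
-- # Cumulative electron capacities over the Aufbau order, computed once.
-- _cumsum = []
-- _t = 0
-- for _lab in _aufbau_order:
--     _t += (_symbol.find(_lab[-1]) * 2 + 1) * 2
--     _cumsum.append(_t)
--
--
-- def _aufbau(z):
--     '''
--     Returns the label of filled orbitals according to Aufbau principle.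
--
--     '''
--     if z <= 0:
--         return [], -z
--     # binary search: smallest index with _cumsum[idx] >= z
--     lo, hi = 0, len(_cumsum)
--     while lo < hi:
--         mid = (lo + hi) // 2
--         if _cumsum[mid] < z:
--             lo = mid + 1
--         else:
--             hi = mid
--     return _aufbau_order[:lo + 1], _cumsum[lo] - z
-- ===== Notes on version B (the rewrite author's own statement) =====
-- stated objective: alternative
-- what changed: Replaces the per-orbital subtraction loop with a precomputed cumulative-capacity table and a binary search for the first cumulative sum >= z, then slices the orbital list.
import Mathlib
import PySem

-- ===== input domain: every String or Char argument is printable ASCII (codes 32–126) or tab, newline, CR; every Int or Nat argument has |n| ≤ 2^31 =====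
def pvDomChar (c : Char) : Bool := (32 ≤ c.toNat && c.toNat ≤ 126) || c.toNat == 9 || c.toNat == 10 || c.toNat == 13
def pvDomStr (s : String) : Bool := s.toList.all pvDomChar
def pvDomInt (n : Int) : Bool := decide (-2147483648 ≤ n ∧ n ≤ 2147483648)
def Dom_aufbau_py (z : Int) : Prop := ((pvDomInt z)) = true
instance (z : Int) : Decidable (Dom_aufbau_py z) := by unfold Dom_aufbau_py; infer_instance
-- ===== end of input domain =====

-- ===== PORT A =====
-- B replaces A's per-orbital subtraction loop with a cumulative-capacity table + binary search (alternative decomposition).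
def pvOrder : List String := ["1s", "2s", "2p", "3s", "3p", "4s", "3d", "4p", "5s", "4d", "5p", "6s", "4f", "5d", "6p", "7s", "5f", "6d", "7p", "8s"]

def pvSym : String := "spdfgh"

-- the while loop of A, recursing over the not-yet-visited suffix of _aufbau_order;
-- the [] case is Python's IndexError, excluded by Pre_aufbau_py.
-- lab[-1] ported exactly via PySem.Str.pyGet? (never none on the 2-char literals of pvOrder).
def pvLoopA : List String → Int → List String → List String × Int
  | orbs, z, acc =>
    if z > 0 then
      match orbs with
      | [] => (acc, -z)
      | o :: rest =>
          pvLoopA rest (z - ((PySem.Str.find pvSym (((PySem.Str.pyGet? o (-1)).getD ' ').toString)) * 2 + 1) * 2) (acc ++ [o])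
    else (acc, -z)

def aufbau_py (z : Int) : List String × Int := pvLoopA pvOrder z []

-- ===== PORT B =====
-- module-level loop of Source B building the cumulative capacities
def pvCumsum : List Int :=
  (pvOrder.foldl
    (fun (st : List Int × Int) lab =>
      let t := st.2 + ((PySem.Str.find pvSym (((PySem.Str.pyGet? lab (-1)).getD ' ').toString)) * 2 + 1) * 2
      (st.1 ++ [t], t))
    ([], 0)).1

-- Source B's hand-written binary-search while loop; indexing _cumsum[mid] with mid < hi ≤ length is
-- always in range, ported with getD 0.  The structural fuel (= initial hi - lo) bounds the
-- iteration count, since hi - lo strictly decreases each pass.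
def pvBS : Nat → Int → Nat → Nat → Nat
  | 0, _, lo, _ => lo
  | fuel + 1, z, lo, hi =>
    if lo < hi then
      let mid := (lo + hi) / 2
      if pvCumsum.getD mid 0 < z then pvBS fuel z (mid + 1) hi else pvBS fuel z lo mid
    else lo

def aufbau_py_alt (z : Int) : List String × Int :=
  if z ≤ 0 then ([], -z)
  else
    let lo := pvBS pvCumsum.length z 0 pvCumsum.length
    (PySem.List.slice pvOrder none (some ((lo : Int) + 1)), pvCumsum.getD lo 0 - z)

-- ===== PRECONDITION & SPEC =====
-- Pre_ excludes exactly the inputs exceeding the total capacity of the listed orbitals, where Python A raises IndexError (and B does too).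
def Pre_aufbau_py (z : Int) : Prop := z ≤ 120
instance (z : Int) : Decidable (Pre_aufbau_py z) := by unfold Pre_aufbau_py; infer_instance
def pvWitness_aufbau_py : Int := 11

def Spec_aufbau_py (z : Int) (out : List String × Int) : Prop := out = aufbau_py_alt z
instance (z : Int) (out : List String × Int) : Decidable (Spec_aufbau_py z out) := by unfold Spec_aufbau_py; infer_instance

-- ===== CLAIM (what is proved, stated in full; the proofs are below) =====
def Claim_equal_aufbau_py : Prop := ∀ (z : Int), Dom_aufbau_py z → Pre_aufbau_py z → Spec_aufbau_py z (aufbau_py z)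

-- ===== LEMMAS AND PROOFS =====

-- A and B agree trivially for z ≤ 0, and on 1 ≤ z ≤ 120 by finite check.
theorem pv_nonpos (z : Int) (h : z ≤ 0) : aufbau_py z = aufbau_py_alt z := by
  simp [aufbau_py, aufbau_py_alt, pvLoopA, pvOrder, h, show ¬ z > 0 by omega]

set_option maxRecDepth 4000 in
theorem pv_range : ∀ n ∈ List.range 120, aufbau_py ((n : Int) + 1) = aufbau_py_alt ((n : Int) + 1) := by decide

-- ===== VERDICT (by name: the statement is the Claim_ definition above) =====
theorem aufbau_py_spec : Claim_equal_aufbau_py := by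
  intro z _ hpre
  unfold Spec_aufbau_py
  have hz : z ≤ 120 := hpre
  by_cases h : z ≤ 0
  · exact pv_nonpos z h
  · have hn : z = ((z - 1).toNat : Int) + 1 := by omega
    have := pv_range (z - 1).toNat (List.mem_range.mpr (by omega))
    rw [hn]; exact this
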